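-- pv_equiv track=rewrite | github.com/AdamEr8/cibus-budget-utilizer | coupons_generator.py | greedy_algo_maximized
-- ===== SOURCE A (Python) =====
-- def greedy_algo_maximized(budget, vouchers):
--     vouchers.sort(reverse=True)  # Sort options in descending order for optimization
--
--     result = []
--     current_sum = 0
--
--     for value in vouchers:
--         while current_sum + value <= budget:
--             result.append(value)
--             current_sum += value
--
--     return result
-- ===== SOURCE B (Python) =====
-- def greedy_algo_maximized(budget, vouchers):
--     vouchers.sort(reverse=True)  # same in-place descending sort (mutation preserved)
--
--     result = []
--     current_sum = 0
--
--     for value in vouchers: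
--         count = (budget - current_sum) // value
--         if count > 0:
--             result += [value] * count
--             current_sum += value * count
--
--     return result
-- ===== Notes on version B (the rewrite author's own statement) =====
-- stated objective: simpler
-- what changed: A's inner one-at-a-time while loop is replaced by a closed-form count = (budget - current_sum) // value per voucher value, appending value repeated count times in one step; the in-place descending sort and output order are kept.
-- outside the precondition, e.g. on greedy_algo_maximized(-1, [0]): A returns [], B raises ZeroDivisionError; on greedy_algo_maximized(-5, [-2]): A returns [], B returns [-2, -2]
import Mathlib
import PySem

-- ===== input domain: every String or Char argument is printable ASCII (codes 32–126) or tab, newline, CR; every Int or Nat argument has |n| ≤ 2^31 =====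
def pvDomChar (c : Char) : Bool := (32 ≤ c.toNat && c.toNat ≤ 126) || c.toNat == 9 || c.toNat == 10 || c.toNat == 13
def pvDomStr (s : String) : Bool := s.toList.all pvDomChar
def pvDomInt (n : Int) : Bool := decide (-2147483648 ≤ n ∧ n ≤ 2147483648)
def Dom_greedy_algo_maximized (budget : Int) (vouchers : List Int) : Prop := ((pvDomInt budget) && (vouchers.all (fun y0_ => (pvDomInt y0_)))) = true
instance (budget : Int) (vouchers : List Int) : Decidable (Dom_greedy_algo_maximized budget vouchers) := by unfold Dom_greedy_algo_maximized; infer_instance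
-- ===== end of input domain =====

-- B replaces A's one-at-a-time inner while loop by a closed-form per-value count (simpler single pass);
-- both sort the argument in place (same mutation); equivalence is about the return value.

-- ===== PORT A =====
-- the inner 'while current_sum + value <= budget' loop of A; the '0 < value' guard only makes the
-- recursion total: when it fails but the Python condition holds, Python A loops forever (outside Pre_)
def greedyWhileA (budget value current : Int) (acc : List Int) : Int × List Int :=
  if 0 < value ∧ current + value ≤ budget then
    greedyWhileA budget value (current + value) (acc ++ [value])
  else (current, acc)
termination_by (budget - current).toNat
decreasing_by omega

def greedy_algo_maximized (budget : Int) (vouchers : List Int) : List Int :=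
  let sortedV := PySem.List.sorted vouchers (fun x => x) true
  (sortedV.foldl (fun (st : List Int × Int) value =>
      let r := greedyWhileA budget value st.2 st.1
      (r.2, r.1)) ([], 0)).1

-- ===== PORT B =====
def greedy_algo_maximized_alt (budget : Int) (vouchers : List Int) : List Int :=
  let sortedV := PySem.List.sorted vouchers (fun x => x) true
  (sortedV.foldl (fun (st : List Int × Int) value =>
      let count := PySem.Int.floordiv (budget - st.2) value
      if 0 < count then (st.1 ++ List.replicate count.toNat value, st.2 + value * count)
      else st) ([], 0)).1

-- ===== PRECONDITION & SPEC =====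
-- Pre_ excludes inputs containing a non-positive voucher value: there Python A either loops forever
-- (whenever such a value still fits the budget) or returns [] for it by accident, while B's division
-- by the value raises (value = 0) or yields a different count (value < 0).
def Pre_greedy_algo_maximized (budget : Int) (vouchers : List Int) : Prop :=
  ∀ v ∈ vouchers, 0 < v

instance (budget : Int) (vouchers : List Int) : Decidable (Pre_greedy_algo_maximized budget vouchers) := by
  unfold Pre_greedy_algo_maximized; infer_instance

def pvWitness_greedy_algo_maximized : Int × List Int := (10, [3, 7, 2])

def Spec_greedy_algo_maximized (budget : Int) (vouchers : List Int) (out : List Int) : Prop := out = greedy_algo_maximized_alt budget vouchers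
instance (budget : Int) (vouchers : List Int) (out : List Int) : Decidable (Spec_greedy_algo_maximized budget vouchers out) := by unfold Spec_greedy_algo_maximized; infer_instance

-- ===== CLAIM (what is proved, stated in full; the proofs are below) =====
def Claim_equal_greedy_algo_maximized : Prop := ∀ (budget : Int) (vouchers : List Int), Dom_greedy_algo_maximized budget vouchers → Pre_greedy_algo_maximized budget vouchers → Spec_greedy_algo_maximized budget vouchers (greedy_algo_maximized budget vouchers)

-- ===== LEMMAS AND PROOFS =====

-- A's inner while loop, for a positive value, performs exactly max(count, 0) iterations
-- where count = (budget - current) // value.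
theorem greedyWhileA_closed (budget value : Int) (hv : 0 < value) :
    ∀ (current : Int) (acc : List Int),
      greedyWhileA budget value current acc =
        (if 0 < PySem.Int.floordiv (budget - current) value
         then (current + value * PySem.Int.floordiv (budget - current) value,
               acc ++ List.replicate (PySem.Int.floordiv (budget - current) value).toNat value)
         else (current, acc)) := by
  intro current acc
  induction current, acc using greedyWhileA.induct budget value with
  | case1 current acc h ih =>
    obtain ⟨-, hle⟩ := h
    have hk1 : (1 : Int) ≤ PySem.Int.floordiv (budget - current) value :=
      (PySem.Int.le_floordiv_iff_mul_le hv).2 (by omega)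
    have hkdef := (PySem.Int.floordiv_eq_iff_of_pos hv
      (a := budget - current) (q := PySem.Int.floordiv (budget - current) value)).1 rfl
    have hstep : PySem.Int.floordiv (budget - (current + value)) value =
        PySem.Int.floordiv (budget - current) value - 1 := by
      rw [PySem.Int.floordiv_eq_iff_of_pos hv]
      constructor <;> nlinarith [hkdef.1, hkdef.2]
    rw [greedyWhileA, if_pos ⟨hv, hle⟩, ih, hstep]
    set k := PySem.Int.floordiv (budget - current) value with hk
    by_cases hk2 : 0 < k - 1
    · rw [if_pos hk2, if_pos (by omega)]
      have hrep : List.replicate k.toNat value = value :: List.replicate (k - 1).toNat value := by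
        have : k.toNat = (k - 1).toNat + 1 := by omega
        rw [this, List.replicate_succ]
      rw [Prod.mk.injEq]
      constructor
      · ring
      · rw [hrep]; simp
    · rw [if_neg hk2, if_pos (by omega)]
      have hk1' : k = 1 := by omega
      rw [hk1', Prod.mk.injEq]
      constructor
      · ring
      · simp
  | case2 current acc h =>
    have hnle : ¬ current + value ≤ budget := by tauto
    have hk : PySem.Int.floordiv (budget - current) value ≤ 0 := by
      by_contra hc
      have := (PySem.Int.le_floordiv_iff_mul_le hv
        (a := budget - current) (q := 1)).1 (by omega)
      omega
    rw [greedyWhileA, if_neg h, if_neg (by omega)]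

-- one step of A's fold equals one step of B's fold when the value is positive
theorem step_eq (budget value : Int) (hv : 0 < value) (st : List Int × Int) :
    (let r := greedyWhileA budget value st.2 st.1; ((r.2, r.1) : List Int × Int)) =
      (let count := PySem.Int.floordiv (budget - st.2) value
       if 0 < count then (st.1 ++ List.replicate count.toNat value, st.2 + value * count)
       else st) := by
  simp only [greedyWhileA_closed budget value hv st.2 st.1]
  by_cases h : 0 < PySem.Int.floordiv (budget - st.2) value
  · simp [h]
  · simp [h]

theorem fold_eq (budget : Int) :
    ∀ (xs : List Int) (st : List Int × Int), (∀ v ∈ xs, 0 < v) →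
      xs.foldl (fun (st : List Int × Int) value =>
        let r := greedyWhileA budget value st.2 st.1
        (r.2, r.1)) st =
      xs.foldl (fun (st : List Int × Int) value =>
        let count := PySem.Int.floordiv (budget - st.2) value
        if 0 < count then (st.1 ++ List.replicate count.toNat value, st.2 + value * count)
        else st) st := by
  intro xs
  induction xs with
  | nil => intro st _; rfl
  | cons v t ih =>
    intro st hpos
    simp only [List.foldl_cons]
    rw [step_eq budget v (hpos v (by simp)) st]
    exact ih _ (fun w hw => hpos w (by simp [hw]))

-- ===== VERDICT (by name: the statement is the Claim_ definition above) =====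
theorem greedy_algo_maximized_spec : Claim_equal_greedy_algo_maximized := by
  intro budget vouchers _ hpre
  unfold Spec_greedy_algo_maximized greedy_algo_maximized greedy_algo_maximized_alt
  have hmem : ∀ v ∈ PySem.List.sorted vouchers (fun x => x) true, 0 < v := by
    intro v hv
    exact hpre v ((PySem.List.mem_sorted _ _ _ _).1 hv)
  exact congrArg Prod.fst (fold_eq budget _ ([], 0) hmem)
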